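-- pv_equiv track=rewrite | github.com/qn06142/coding-python | csphn_hp_seq.py | rising
-- ===== SOURCE A (Python) =====
-- def rising(array, n):
--     sequences = []
--     start = 0
--     for current in range(n):
--         seq = []
--         from_ = current
--         if array[current] < array[current - 1]:
--             start = current
--         while from_ >= start:
--             seq.insert(0, array[from_])
--             from_ -= 1
--             sequences.append(seq.copy())
--     return sequences
-- ===== SOURCE B (Python) =====
-- def rising(array, n):
--     # Pass 1: record each index's run-start (same array[current-1] test as A,
--     # so the index-0 comparison against array[-1] is reproduced).
--     starts = []
--     start = 0
--     for current in range(n):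
--         if array[current] < array[current - 1]:
--             start = current
--         starts.append(start)
--     # Pass 2: emit, for each index, the slices ending there, shortest first.
--     out = []
--     for current, s in enumerate(starts):
--         for j in range(current, s - 1, -1):
--             out.append(array[j:current + 1])
--     return out
-- ===== Notes on version B (the rewrite author's own statement) =====
-- stated objective: simpler
-- what changed: Replaced A's single pass with its insert(0)+copy() incremental sequence building inside a while loop by two passes: first compute each index's run-start table, then emit each subsequence directly as a fresh slice array[j:current+1].
import Mathlib
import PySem

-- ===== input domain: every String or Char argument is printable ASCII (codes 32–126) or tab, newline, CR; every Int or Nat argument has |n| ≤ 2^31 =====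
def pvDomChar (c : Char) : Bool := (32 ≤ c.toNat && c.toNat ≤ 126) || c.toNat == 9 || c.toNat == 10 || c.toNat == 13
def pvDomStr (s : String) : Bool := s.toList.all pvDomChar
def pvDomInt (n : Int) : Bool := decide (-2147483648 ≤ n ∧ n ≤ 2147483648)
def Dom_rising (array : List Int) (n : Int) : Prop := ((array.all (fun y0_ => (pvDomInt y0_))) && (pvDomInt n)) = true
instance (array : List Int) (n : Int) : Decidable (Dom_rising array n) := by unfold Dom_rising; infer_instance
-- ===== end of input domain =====

-- B replaces A's one-pass insert(0)+copy() incremental build by two passes (a run-start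
-- table, then direct slice emission); objective: simpler.

-- ===== PORT A =====
-- the inner 'while from_ >= start' loop of A (seq grows at the front, each copy appended)
def risingWhile (array : List Int) (start : Int) (from_ : Int) (seq : List Int)
    (acc : List (List Int)) : List (List Int) :=
  if _h : start ≤ from_ then
    let seq' := PySem.List.pyGetD array from_ 0 :: seq
    risingWhile array start (from_ - 1) seq' (acc ++ [seq'])
  else acc
termination_by (from_ + 1 - start).toNat
decreasing_by omega

def rising (array : List Int) (n : Int) : List (List Int) :=
  ((PySem.List.pyRange 0 n 1).foldl
    (fun (st : List (List Int) × Int) current =>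
      let start := if PySem.List.pyGetD array current 0 < PySem.List.pyGetD array (current - 1) 0
                   then current else st.2
      (risingWhile array start current [] st.1, start))
    ([], 0)).1

-- ===== PORT B =====
-- pass 1 of B: the run-start table
def runStarts (array : List Int) (n : Int) : List Int :=
  ((PySem.List.pyRange 0 n 1).foldl
    (fun (st : List Int × Int) current =>
      let s := if PySem.List.pyGetD array current 0 < PySem.List.pyGetD array (current - 1) 0
               then current else st.2
      (st.1 ++ [s], s))
    ([], 0)).1

def rising_alt (array : List Int) (n : Int) : List (List Int) :=
  (PySem.List.enumerate (runStarts array n) 0).foldl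
    (fun out cs =>
      (PySem.List.pyRange cs.1 (cs.2 - 1) (-1)).foldl
        (fun out j => out ++ [PySem.List.slice array (some j) (some (cs.1 + 1))]) out)
    []

-- ===== PRECONDITION & SPEC =====
-- Pre_ excludes exactly the inputs where the Python A raises IndexError (array[current]
-- with current up to n-1 needs n ≤ len(array); the array[-1] read itself is benign).
def Pre_rising (array : List Int) (n : Int) : Prop := n ≤ (array.length : Int)
instance (array : List Int) (n : Int) : Decidable (Pre_rising array n) := by
  unfold Pre_rising; infer_instance

def pvWitness_rising : List Int × Int := ([3, 1, 2], 3)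

def Spec_rising (array : List Int) (n : Int) (out : List (List Int)) : Prop := out = rising_alt array n
instance (array : List Int) (n : Int) (out : List (List Int)) : Decidable (Spec_rising array n out) := by unfold Spec_rising; infer_instance

-- ===== CLAIM (what is proved, stated in full; the proofs are below) =====
def Claim_equal_rising : Prop := ∀ (array : List Int) (n : Int), Dom_rising array n → Pre_rising array n → Spec_rising array n (rising array n)

-- ===== LEMMAS AND PROOFS =====

-- A's per-iteration step and B's pass-1 step, named for the proofs
def stepA (array : List Int) (st : List (List Int) × Int) (current : Int) :
    List (List Int) × Int :=
  let start := if PySem.List.pyGetD array current 0 < PySem.List.pyGetD array (current - 1) 0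
               then current else st.2
  (risingWhile array start current [] st.1, start)

def stepS (array : List Int) (st : List Int × Int) (current : Int) : List Int × Int :=
  let s := if PySem.List.pyGetD array current 0 < PySem.List.pyGetD array (current - 1) 0
           then current else st.2
  (st.1 ++ [s], s)

-- what B emits for the table entry (index c, run start s)
def emitOne (array : List Int) (cs : Int × Int) : List (List Int) :=
  (PySem.List.pyRange cs.1 (cs.2 - 1) (-1)).map
    (fun j => PySem.List.slice array (some j) (some (cs.1 + 1)))

def emitAll (array : List Int) (l : List Int) : List (List Int) :=
  (PySem.List.enumerate l 0).flatMap (emitOne array)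

lemma rising_eq_foldA (array : List Int) (n : Int) :
    rising array n = ((PySem.List.pyRange 0 n 1).foldl (stepA array) ([], 0)).1 := rfl

lemma runStarts_eq_foldS (array : List Int) (n : Int) :
    runStarts array n = ((PySem.List.pyRange 0 n 1).foldl (stepS array) ([], 0)).1 := rfl

lemma rising_alt_eq_emitAll (array : List Int) (n : Int) :
    rising_alt array n = emitAll array (runStarts array n) := by
  unfold rising_alt emitAll emitOne
  simp only [PySem.List.foldl_append_singleton_eq_map]
  rw [PySem.List.foldl_append_eq_flatMap]
  simp

-- consing the next element onto a suffix slice extends the slice by one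
lemma slice_cons (array : List Int) (f c : Int) (h0 : 0 ≤ f) (h1 : f < (array.length : Int))
    (h2 : f ≤ c) :
    PySem.List.pyGetD array f 0 :: PySem.List.slice array (some (f + 1)) (some (c + 1))
      = PySem.List.slice array (some f) (some (c + 1)) := by
  rw [PySem.List.pyGetD_eq_getElem array 0 h0 h1,
      PySem.List.slice_toNat array (by omega) (by omega),
      PySem.List.slice_toNat array h0 (by omega),
      List.drop_eq_getElem_cons (i := f.toNat) (by omega)]
  have h3 : (f + 1).toNat = f.toNat + 1 := by omega
  have h4 : (c + 1).toNat - f.toNat = ((c + 1).toNat - (f + 1).toNat) + 1 := by omega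
  rw [h3, h4, List.take_succ_cons]
  rw [show (c + 1).toNat - (f.toNat + 1) = (c + 1).toNat - (f + 1).toNat by omega]

-- A's while loop produces exactly B's slices, shortest first
lemma risingWhile_eq (array : List Int) (c : Int) (hc : c < (array.length : Int)) :
    ∀ (k : Nat) (f s : Int), (f + 1 - s).toNat = k → 0 ≤ s → s - 1 ≤ f → f ≤ c →
      ∀ (acc : List (List Int)),
      risingWhile array s f (PySem.List.slice array (some (f + 1)) (some (c + 1))) acc
        = acc ++ (PySem.List.pyRange f (s - 1) (-1)).map
            (fun j => PySem.List.slice array (some j) (some (c + 1))) := by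
  intro k
  induction k with
  | zero =>
    intro f s hk h0 h1 h2 acc
    have hfs : f = s - 1 := by omega
    rw [risingWhile, dif_neg (by omega), PySem.List.pyRange_neg_one_eq_nil (by omega)]
    simp
  | succ k ih =>
    intro f s hk h0 h1 h2 acc
    have hsf : s ≤ f := by omega
    rw [risingWhile, dif_pos hsf]
    have hcons := slice_cons array f c (by omega) (by omega) h2
    simp only [hcons]
    have hf1 : f = (f - 1) + 1 := by omega
    have := ih (f - 1) s (by omega) h0 (by omega) (by omega)
      (acc ++ [PySem.List.slice array (some f) (some (c + 1))])
    rw [show PySem.List.slice array (some f) (some (c + 1))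
          = PySem.List.slice array (some ((f - 1) + 1)) (some (c + 1)) by rw [← hf1]] at this ⊢
    rw [this, PySem.List.pyRange_neg_one_cons (show s - 1 < f by omega)]
    simp

-- the joint invariant of A's fold and B's pass-1 fold
lemma fold_invariant (array : List Int) :
    ∀ (m : Nat), (m : Int) ≤ (array.length : Int) →
      ((PySem.List.pyRange 0 (m : Int) 1).foldl (stepA array) ([], 0)).2
          = ((PySem.List.pyRange 0 (m : Int) 1).foldl (stepS array) ([], 0)).2 ∧
        0 ≤ ((PySem.List.pyRange 0 (m : Int) 1).foldl (stepS array) ([], 0)).2 ∧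
        ((PySem.List.pyRange 0 (m : Int) 1).foldl (stepS array) ([], 0)).2 ≤ (m : Int) ∧
        ((PySem.List.pyRange 0 (m : Int) 1).foldl (stepS array) ([], 0)).1.length = m ∧
        ((PySem.List.pyRange 0 (m : Int) 1).foldl (stepA array) ([], 0)).1
          = emitAll array ((PySem.List.pyRange 0 (m : Int) 1).foldl (stepS array) ([], 0)).1 := by
  intro m
  induction m with
  | zero =>
    intro _
    rw [PySem.List.pyRange_one_eq_nil (by omega)]
    simp [emitAll, PySem.List.enumerate_nil]
  | succ m ih =>
    intro hlen
    obtain ⟨h2, hpos, hle, hlenS, hemit⟩ := ih (by push_cast at hlen ⊢; omega)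
    have hcast : (((m + 1 : Nat)) : Int) = (m : Int) + 1 := by push_cast; ring
    rw [hcast, PySem.List.pyRange_one_succ_right (by positivity), List.foldl_append,
        List.foldl_append]
    set Ap := (PySem.List.pyRange 0 (m : Int) 1).foldl (stepA array) ([], 0) with hAp
    set Sp := (PySem.List.pyRange 0 (m : Int) 1).foldl (stepS array) ([], 0) with hSp
    simp only [List.foldl_cons, List.foldl_nil, stepA, stepS]
    rw [h2]
    set s : Int := if PySem.List.pyGetD array (m : Int) 0
        < PySem.List.pyGetD array ((m : Int) - 1) 0 then (m : Int) else Sp.2 with hs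
    have hmlen : (m : Int) < (array.length : Int) := by push_cast at hlen; omega
    have hs0 : 0 ≤ s := by rw [hs]; split <;> omega
    have hsm : s ≤ (m : Int) := by rw [hs]; split <;> omega
    refine ⟨rfl, hs0, by omega, by simp [hlenS], ?_⟩
    show risingWhile array s (m : Int) [] Ap.1 = emitAll array (Sp.1 ++ [s])
    have hnil : ([] : List Int)
        = PySem.List.slice array (some ((m : Int) + 1)) (some ((m : Int) + 1)) := by
      rw [PySem.List.slice_toNat array (by omega) (by omega)]
      simp
    have hw := risingWhile_eq array (m : Int) hmlen ((m : Int) + 1 - s).toNat (m : Int) s rfl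
          hs0 (by omega) (by omega) Ap.1
    rw [← hnil] at hw
    rw [hw, hemit]
    unfold emitAll
    rw [PySem.List.enumerate_append, List.flatMap_append, hlenS]
    simp [emitOne, PySem.List.enumerate_cons, PySem.List.enumerate_nil]

-- ===== VERDICT (by name: the statement is the Claim_ definition above) =====
theorem rising_spec : Claim_equal_rising := by
  intro array n _ hpre
  unfold Spec_rising
  rw [rising_alt_eq_emitAll, rising_eq_foldA, runStarts_eq_foldS]
  by_cases hn : n ≤ 0
  · rw [PySem.List.pyRange_one_eq_nil hn]
    simp [emitAll, PySem.List.enumerate_nil]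
  · have hn' : n = ((n.toNat : Nat) : Int) := by omega
    rw [hn']
    exact (fold_invariant array n.toNat (by unfold Pre_rising at hpre; omega)).2.2.2.2
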